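-- pv_equiv track=rewrite | github.com/K-Y-k/Coding_Test_Python_SQL | 프로그래머스/Lv2/롤케이크 자르기-딕셔너리, 키 제거.py | solution
-- ===== SOURCE A (Python) =====
-- def solution(topping):
--     answer = 0
--
--     for i in range(1, len(topping)):                    # 주어진 topping길이를 차례로 반복하면서
--         tmp1 = topping[:i]                              # 현재 차례의 인덱스를 기준으로 각 슬라이싱한 케이크 2개를 만들고
--         tmp2 = topping[i:]
--
--         if len(set(tmp1)) == len(set(tmp2)):            # set으로 중복을 없애 다른 종류의 개수로 비교하였지만
--             answer += 1
--                                                         # 계속 반복할 때마다 해당 케이크를 초기화를 하는 과정에서 시간초과가 발생하였다.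
--
--     return answer
-- ===== SOURCE B (Python) =====
-- def solution(topping):
--     seen = set()
--     suf = []
--     for t in reversed(topping):
--         seen.add(t)
--         suf.append(len(seen))
--     suf.reverse()                      # suf[i] = number of distinct toppings in topping[i:]
--     seen = set()
--     answer = 0
--     for t, s in zip(topping, suf[1:]):
--         seen.add(t)
--         if len(seen) == s:
--             answer += 1
--     return answer
-- ===== Notes on version B (the rewrite author's own statement) =====
-- stated objective: faster
-- what changed: Instead of slicing the list at every split and rebuilding two sets per split, B precomputes suffix distinct counts in one reversed pass and grows a prefix set in a second pass, comparing counts at each split.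
import Mathlib
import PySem

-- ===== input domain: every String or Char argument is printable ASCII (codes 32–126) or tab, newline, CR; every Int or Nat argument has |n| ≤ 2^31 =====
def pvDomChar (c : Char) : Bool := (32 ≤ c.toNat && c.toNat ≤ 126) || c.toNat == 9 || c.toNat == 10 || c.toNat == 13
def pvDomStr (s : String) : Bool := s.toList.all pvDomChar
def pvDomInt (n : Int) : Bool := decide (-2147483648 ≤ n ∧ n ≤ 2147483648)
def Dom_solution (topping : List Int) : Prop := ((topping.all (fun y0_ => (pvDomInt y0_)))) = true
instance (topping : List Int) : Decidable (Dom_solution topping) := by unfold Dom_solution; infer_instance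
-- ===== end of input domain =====

-- B replaces A's per-split slicing and set rebuilding with one right-to-left pass precomputing
-- suffix distinct counts and one left-to-right pass growing a prefix set (objective: faster).

-- ===== PORT A =====
def solution (topping : List Int) : Int :=
  (PySem.List.pyRange 1 (topping.length : Int)).foldl
    (fun answer i =>
      let tmp1 := PySem.List.slice topping none (some i)
      let tmp2 := PySem.List.slice topping (some i) none
      if PySem.Set.len (PySem.Set.ofList tmp1) = PySem.Set.len (PySem.Set.ofList tmp2)
      then answer + 1 else answer)
    0

-- ===== PORT B =====
def solution_alt (topping : List Int) : Int :=
  let p := topping.reverse.foldl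
      (fun (st : PySem.Set Int × List Int) t =>
        let seen := st.1.add t
        (seen, st.2 ++ [PySem.Set.len seen]))
      (PySem.Set.empty, [])
  let suf := p.2.reverse
  let q := (topping.zip (PySem.List.slice suf (some 1) none)).foldl
      (fun (st : PySem.Set Int × Int) ts =>
        let seen := st.1.add ts.1
        (seen, if PySem.Set.len seen = ts.2 then st.2 + 1 else st.2))
      (PySem.Set.empty, 0)
  q.2

-- ===== PRECONDITION & SPEC =====
def Spec_solution (topping : List Int) (out : Int) : Prop := out = solution_alt topping
instance (topping : List Int) (out : Int) : Decidable (Spec_solution topping out) := by unfold Spec_solution; infer_instance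

-- ===== CLAIM (what is proved, stated in full; the proofs are below) =====
def Claim_equal_solution : Prop := ∀ (topping : List Int), Dom_solution topping → Spec_solution topping (solution topping)

-- ===== LEMMAS AND PROOFS =====

-- number of distinct elements of a list, as Python's len(set(xs))
def dd (xs : List Int) : Int := PySem.Set.len (PySem.Set.ofList xs)

-- the count both programs compute: splits 1..n-1 written as k+1 for k < n-1
def goodCount (topping : List Int) : Int :=
  ((List.range (topping.length - 1)).countP
    (fun k => decide (dd (topping.take (k+1)) = dd (topping.drop (k+1)))) : Int)

lemma dd_reverse (xs : List Int) : dd xs.reverse = dd xs := by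
  have h : (PySem.Set.ofList xs.reverse).Perm (PySem.Set.ofList xs) :=
    (List.perm_ext_iff_of_nodup (PySem.Set.nodup_ofList _) (PySem.Set.nodup_ofList _)).2
      (by intro a; simp [PySem.Set.mem_ofList])
  simp [dd, PySem.Set.len, h.length_eq]

lemma pyRange_one_natCast (n : Nat) :
    PySem.List.pyRange 1 (n : Int) = (List.range (n - 1)).map (fun k => ((k + 1 : Nat) : Int)) := by
  cases n with
  | zero => decide
  | succ m =>
    have h0 : PySem.List.pyRange 0 ((m+1 : Nat) : Int) = 0 :: PySem.List.pyRange (0+1) ((m+1 : Nat) : Int) :=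
      PySem.List.pyRange_one_cons (by exact_mod_cast Nat.succ_pos m)
    have h1 := PySem.List.pyRange_zero_natCast (m+1)
    rw [h1, List.range_succ_eq_map, List.map_cons, List.map_map] at h0
    simpa using h0.symm

lemma solution_eq_goodCount (topping : List Int) : solution topping = goodCount topping := by
  unfold solution goodCount
  rw [pyRange_one_natCast, List.foldl_map]
  simp only [PySem.List.slice_to_natCast, PySem.List.slice_from_natCast]
  have h := PySem.List.foldl_count_if
    (fun k => decide (dd (topping.take (k+1)) = dd (topping.drop (k+1))))
    (List.range (topping.length - 1)) 0
  simp only [decide_eq_true_eq, dd] at h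
  rw [h]
  simp [dd, PySem.Set.len]

lemma loop1_general (r p : List Int) (acc : List Int) :
    r.foldl (fun (st : PySem.Set Int × List Int) t =>
        (st.1.add t, st.2 ++ [PySem.Set.len (st.1.add t)])) (PySem.Set.ofList p, acc)
      = (PySem.Set.ofList (p ++ r),
         acc ++ (List.range r.length).map (fun j => dd (p ++ r.take (j+1)))) := by
  induction r generalizing p acc with
  | nil => simp
  | cons y r' ih =>
    have hadd : (PySem.Set.ofList p).add y = PySem.Set.ofList (p ++ [y]) :=
      (PySem.Set.ofList_append_singleton p y).symm
    simp only [List.foldl_cons, hadd]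
    rw [ih (p ++ [y])]
    simp [List.range_succ_eq_map, List.map_map, List.append_assoc, dd, List.take_succ_cons,
      Function.comp]

-- B's count loop, written as structural recursion for the induction
def cnt (p ys vs : List Int) : Int :=
  match ys, vs with
  | y :: ys', v :: vs' => (if dd (p ++ [y]) = v then 1 else 0) + cnt (p ++ [y]) ys' vs'
  | _, _ => 0
  termination_by ys

lemma loop2_general (ys vs p : List Int) (a : Int) :
    ((ys.zip vs).foldl (fun (st : PySem.Set Int × Int) ts =>
        (st.1.add ts.1, if PySem.Set.len (st.1.add ts.1) = ts.2 then st.2 + 1 else st.2))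
      (PySem.Set.ofList p, a)).2
      = a + cnt p ys vs := by
  induction ys generalizing vs p a with
  | nil => simp [cnt]
  | cons y ys' ih =>
    cases vs with
    | nil => simp [cnt]
    | cons v vs' =>
      have hadd : (PySem.Set.ofList p).add y = PySem.Set.ofList (p ++ [y]) :=
        (PySem.Set.ofList_append_singleton p y).symm
      simp only [List.zip_cons_cons, List.foldl_cons, hadd]
      rw [ih vs' (p ++ [y])]
      simp only [cnt, dd]
      split_ifs <;> ring

lemma cnt_spec (ys : List Int) (m : Nat) (g : Nat → Int) (p : List Int) (h : m ≤ ys.length) :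
    cnt p ys ((List.range m).map g)
      = ((List.range m).countP (fun k => decide (dd (p ++ ys.take (k+1)) = g k)) : Int) := by
  induction ys generalizing m g p with
  | nil =>
    have : m = 0 := by simpa using h
    subst this; simp [cnt]
  | cons y ys' ih =>
    cases m with
    | zero => simp [cnt]
    | succ m' =>
      rw [List.range_succ_eq_map, List.map_cons, List.map_map]
      simp only [cnt]
      rw [ih m' (g ∘ Nat.succ) (p ++ [y]) (by simpa using h)]
      simp only [List.countP_cons, List.countP_map, Function.comp, Nat.succ_eq_add_one,
        decide_eq_true_eq]
      simp only [List.take_succ_cons, List.take_zero, List.cons_append,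
        List.append_assoc, List.nil_append]
      push_cast
      split_ifs <;>
          simp_all [Function.comp_def, Nat.succ_eq_add_one] <;>
        first
        | rfl
        | exact add_comm 1 _

lemma suf_eq (topping : List Int) :
    ((List.range topping.reverse.length).map
        (fun j => dd (topping.reverse.take (j+1)))).reverse
      = (List.range topping.length).map (fun i => dd (topping.drop i)) := by
  apply List.ext_getElem
  · simp
  · intro i h1 h2
    simp only [List.length_reverse, List.length_map, List.length_range] at h1 h2
    rw [List.getElem_reverse]
    simp only [List.length_map, List.length_range, List.getElem_map, List.getElem_range]
    have hn : topping.length - 1 - i + 1 = topping.length - i := by omega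
    rw [List.length_reverse, hn]
    have hr := List.rtake_eq_reverse_take_reverse (l := topping) (n := topping.length - i)
    have ht : topping.reverse.take (topping.length - i) = (topping.rtake (topping.length - i)).reverse := by
      rw [hr, List.reverse_reverse]
    have hd : topping.rtake (topping.length - i) = topping.drop i := by
      simp only [List.rtake]
      congr 1
      omega
    rw [ht, hd, dd_reverse]

lemma solution_alt_eq_goodCount (topping : List Int) : solution_alt topping = goodCount topping := by
  simp only [solution_alt]
  rw [show (PySem.Set.empty : PySem.Set Int) = PySem.Set.ofList [] from rfl]
  rw [loop1_general topping.reverse [] []]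
  simp only [List.nil_append]
  rw [suf_eq, PySem.List.slice_from_one]
  cases topping with
  | nil => simp [goodCount]
  | cons t rest =>
    rw [show (t :: rest).length = rest.length + 1 from rfl, List.range_succ_eq_map,
      List.map_cons, List.tail_cons, List.map_map]
    rw [loop2_general (t :: rest) _ [] 0]
    rw [cnt_spec (t :: rest) rest.length _ [] (by simp)]
    simp only [goodCount, Function.comp, List.nil_append, List.take_succ_cons, List.drop_succ_cons,
      List.length_cons, Nat.add_sub_cancel, zero_add]
    rfl

-- ===== VERDICT (by name: the statement is the Claim_ definition above) =====
theorem solution_spec : Claim_equal_solution := by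
  intro topping _
  unfold Spec_solution
  rw [solution_eq_goodCount, solution_alt_eq_goodCount]
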